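-- pv_equiv track=rewrite | github.com/MadeTorres07/Sena-English-ChatBot | app/services/vocab_service.py | _is_practical_word
-- ===== SOURCE A (Python) =====
-- def _is_practical_word(word: str) -> bool:
--     """Determina si una palabra es de uso práctico común"""
--     practical_words = {
--         "hello", "goodbye", "please", "thank", "sorry", "excuse",
--         "help", "need", "want", "have", "do", "make", "take", "give",
--         "go", "come", "see", "look", "hear", "say", "tell", "ask",
--         "eat", "drink", "sleep", "work", "study", "learn", "teach",
--         "buy", "sell", "pay", "cost", "price", "money", "time", "day"
--     }
--
--     return any(practical in word.lower() for practical in practical_words)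
-- ===== SOURCE B (Python) =====
-- _PATTERNS = ("hello goodbye please thank sorry excuse help need want have do make "
--              "take give go come see look hear say tell ask eat drink sleep work "
--              "study learn teach buy sell pay cost price money time day").split()
--
--
-- def _is_practical_word(word: str) -> bool:
--     # Scan the lowercased word position by position and try to match each
--     # pattern as a prefix of the remaining tail, instead of running a full
--     # substring search per pattern.
--     w = word.lower()
--     for i in range(len(w)):
--         tail = w[i:]
--         for p in _PATTERNS:
--             if tail.startswith(p):
--                 return True
--     return False
-- ===== Notes on version B (the rewrite author's own statement) =====
-- stated objective: alternative
-- what changed: Inverts the traversal: instead of one substring-containment search per pattern, B lowercases once and scans start positions of the word, prefix-matching each pattern against the tail; the patterns are kept as one split string rather than a set literal.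
import Mathlib
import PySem

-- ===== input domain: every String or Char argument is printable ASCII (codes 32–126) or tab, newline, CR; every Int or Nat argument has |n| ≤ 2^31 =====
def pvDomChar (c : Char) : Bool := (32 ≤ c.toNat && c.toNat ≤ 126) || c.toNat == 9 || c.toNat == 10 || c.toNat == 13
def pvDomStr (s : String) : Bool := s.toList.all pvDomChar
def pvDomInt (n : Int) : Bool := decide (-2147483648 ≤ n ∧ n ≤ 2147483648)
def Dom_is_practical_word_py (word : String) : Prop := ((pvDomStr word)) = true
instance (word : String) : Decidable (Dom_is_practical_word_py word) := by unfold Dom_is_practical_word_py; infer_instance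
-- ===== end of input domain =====

-- B inverts A's traversal: it scans the lowercased word's start positions and
-- prefix-matches each pattern against the tail (objective: alternative).

-- ===== PORT A =====
-- the Python set literal (iteration order does not affect `any`)
def pvPracticalWords : PySem.Set String := PySem.Set.ofList
  ["hello", "goodbye", "please", "thank", "sorry", "excuse",
   "help", "need", "want", "have", "do", "make", "take", "give",
   "go", "come", "see", "look", "hear", "say", "tell", "ask",
   "eat", "drink", "sleep", "work", "study", "learn", "teach",
   "buy", "sell", "pay", "cost", "price", "money", "time", "day"]

def is_practical_word_py (word : String) : Bool :=
  (pvPracticalWords : List String).any (fun practical => PySem.Str.isIn practical (PySem.Str.lower word))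

-- ===== PORT B =====
-- _PATTERNS = "...".split()
def pvPatterns : List String := PySem.Str.split₀
  ("hello goodbye please thank sorry excuse help need want have do make " ++
   "take give go come see look hear say tell ask eat drink sleep work " ++
   "study learn teach buy sell pay cost price money time day")

-- for i in range(len(w)): tail = w[i:]; for p in _PATTERNS: if tail.startswith(p): return True
def is_practical_word_py_alt (word : String) : Bool :=
  let w := PySem.Chars.lower word.toList
  (List.range w.length).any (fun i =>
    pvPatterns.any (fun p => PySem.Chars.startswith (w.drop i) p.toList))

-- ===== PRECONDITION & SPEC =====
def Spec_is_practical_word_py (word : String) (out : Bool) : Prop := out = is_practical_word_py_alt word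
instance (word : String) (out : Bool) : Decidable (Spec_is_practical_word_py word out) := by unfold Spec_is_practical_word_py; infer_instance

-- ===== CLAIM (what is proved, stated in full; the proofs are below) =====
def Claim_equal_is_practical_word_py : Prop := ∀ (word : String), Dom_is_practical_word_py word → Spec_is_practical_word_py word (is_practical_word_py word)

-- ===== LEMMAS AND PROOFS =====

-- A's set and B's split word-list carry the same patterns; all are non-empty
set_option maxRecDepth 8192 in
theorem pv_set_sub : ∀ p ∈ (pvPracticalWords : List String), p ∈ pvPatterns ∧ p.toList ≠ [] := by decide

set_option maxRecDepth 8192 in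
theorem pv_pat_sub : ∀ p ∈ pvPatterns, p ∈ (pvPracticalWords : List String) := by decide

theorem pv_A_iff (word : String) :
    is_practical_word_py word = true ↔
      ∃ p ∈ (pvPracticalWords : List String), p.toList <:+: PySem.Chars.lower word.toList := by
  simp [is_practical_word_py, List.any_eq_true, PySem.Chars.isIn_iff_infix]

theorem pv_B_iff (word : String) :
    is_practical_word_py_alt word = true ↔
      ∃ i < (PySem.Chars.lower word.toList).length, ∃ p ∈ pvPatterns,
        p.toList <+: (PySem.Chars.lower word.toList).drop i := by
  simp [is_practical_word_py_alt, List.any_eq_true, List.mem_range, PySem.Chars.startswith_iff]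

theorem pv_main (word : String) : is_practical_word_py word = is_practical_word_py_alt word := by
  set w := PySem.Chars.lower word.toList with hw
  rw [Bool.eq_iff_iff, pv_A_iff, pv_B_iff, ← hw]
  constructor
  · rintro ⟨p, hp, s, t, hst⟩
    obtain ⟨hmem, hne⟩ := pv_set_sub p hp
    have hlen : s.length + (p.toList.length + t.length) = w.length := by
      simpa [List.length_append, Nat.add_assoc] using congrArg List.length hst
    have hp1 : 0 < p.toList.length := List.length_pos_iff.mpr hne
    refine ⟨s.length, by omega, p, hmem, ?_⟩
    have hdrop : w.drop s.length = p.toList ++ t := by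
      rw [← hst, List.append_assoc, List.drop_left]
    exact hdrop ▸ List.prefix_append _ _
  · rintro ⟨i, hi, p, hp, hpre⟩
    exact ⟨p, pv_pat_sub p hp, hpre.isInfix.trans (List.drop_suffix i w).isInfix⟩

-- ===== VERDICT (by name: the statement is the Claim_ definition above) =====
theorem is_practical_word_py_spec : Claim_equal_is_practical_word_py := by
  intro word _
  unfold Spec_is_practical_word_py
  exact pv_main word
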